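-- pv_equiv track=rewrite | github.com/sambleu13/brush-up-coding_interviews-with-python | dictionaries/password_strength_exercise.py | multi_password_strength_counter
-- ===== SOURCE A (Python) =====
-- def multi_password_strength_counter(passwords):
--     special_characters = "!@#$%^&*()-+"
--     result = []
--     for password in passwords:
--         password_strength = {'length': False, 'digit': False, 'lowercase': False,'uppercase': False,  'special_char': False}
--         if len(password) >= 8:
--             password_strength['length'] = True
--
--         for char in password:
--             if char.isdigit():
--                 password_strength['digit'] = True
--             if char.isupper():
--                 password_strength['uppercase'] = True
--             if char.islower():
--                 password_strength['lowercase'] = True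
--             if char in special_characters:
--                 password_strength['special_char'] = True
--         result.append((password, password_strength))
--     return result
-- ===== SOURCE B (Python) =====
-- def multi_password_strength_counter(passwords):
--     special_characters = "!@#$%^&*()-+"
--     return [
--         (password, {
--             'length': len(password) >= 8,
--             'digit': any(c.isdigit() for c in password),
--             'lowercase': any(c.islower() for c in password),
--             'uppercase': any(c.isupper() for c in password),
--             'special_char': any(c in special_characters for c in password),
--         })
--         for password in passwords
--     ]
-- ===== Notes on version B (the rewrite author's own statement) =====
-- stated objective: idiomatic
-- what changed: Replaced A's single fused per-character scan that imperatively mutates a flags dict with a comprehension building each password's dict in one literal, each flag computed by its own independent short-circuiting any() pass.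
import Mathlib
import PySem

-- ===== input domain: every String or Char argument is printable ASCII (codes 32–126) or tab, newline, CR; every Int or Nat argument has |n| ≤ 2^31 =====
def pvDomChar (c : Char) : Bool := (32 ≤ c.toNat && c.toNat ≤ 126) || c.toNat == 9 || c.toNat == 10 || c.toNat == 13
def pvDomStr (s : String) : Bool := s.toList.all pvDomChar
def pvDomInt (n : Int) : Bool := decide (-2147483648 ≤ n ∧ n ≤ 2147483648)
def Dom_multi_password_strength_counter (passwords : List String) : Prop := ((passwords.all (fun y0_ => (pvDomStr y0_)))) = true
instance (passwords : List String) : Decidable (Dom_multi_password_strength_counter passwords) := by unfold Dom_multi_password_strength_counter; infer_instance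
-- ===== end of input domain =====

-- B replaces A's single fused per-character scan that mutates a flags dict with one dict
-- literal per password whose five flags each come from an independent short-circuiting
-- any()-pass (objective: idiomatic; same asymptotic cost).

-- ===== PORT A =====
def multi_password_strength_counter (passwords : List String) : List (String × (List (String × Bool))) :=
  let special_characters := "!@#$%^&*()-+"
  passwords.foldl (fun result password =>
    let password_strength : PySem.Dict String Bool :=
      PySem.Dict.mk [("length", false), ("digit", false), ("lowercase", false),
                     ("uppercase", false), ("special_char", false)]
    let password_strength :=
      if 8 ≤ PySem.Str.len password then password_strength.insert "length" true
      else password_strength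
    let password_strength :=
      password.toList.foldl (fun st char =>
        let st := if PySem.Chars.isdigit char then st.insert "digit" true else st
        let st := if PySem.Chars.isupper char then st.insert "uppercase" true else st
        let st := if PySem.Chars.islower char then st.insert "lowercase" true else st
        let st := if PySem.Chars.isIn [char] special_characters.toList then st.insert "special_char" true else st
        st) password_strength
    result ++ [(password, password_strength.items)]) []

-- ===== PORT B =====
def multi_password_strength_counter_alt (passwords : List String) : List (String × (List (String × Bool))) :=
  passwords.map (fun password =>
    (password,
      [("length", decide (8 ≤ PySem.Str.len password)),
       ("digit", password.toList.any PySem.Chars.isdigit),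
       ("lowercase", password.toList.any PySem.Chars.islower),
       ("uppercase", password.toList.any PySem.Chars.isupper),
       ("special_char", password.toList.any (fun c => PySem.Chars.isIn [c] "!@#$%^&*()-+".toList))]))

-- ===== PRECONDITION & SPEC =====
def Spec_multi_password_strength_counter (passwords : List String) (out : List (String × (List (String × Bool)))) : Prop := out = multi_password_strength_counter_alt passwords
instance (passwords : List String) (out : List (String × (List (String × Bool)))) : Decidable (Spec_multi_password_strength_counter passwords out) := by unfold Spec_multi_password_strength_counter; infer_instance

-- ===== CLAIM (what is proved, stated in full; the proofs are below) =====
def Claim_equal_multi_password_strength_counter : Prop := ∀ (passwords : List String), Dom_multi_password_strength_counter passwords → Spec_multi_password_strength_counter passwords (multi_password_strength_counter passwords)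

-- ===== LEMMAS AND PROOFS =====

/-- The flags dict of A at any moment: fixed five keys, variable flag values. -/
def pvMkD (l d lc u s : Bool) : PySem.Dict String Bool :=
  PySem.Dict.mk [("length", l), ("digit", d), ("lowercase", lc), ("uppercase", u), ("special_char", s)]

@[simp] lemma pvMkD_ins_digit (l d lc u s : Bool) :
    (pvMkD l d lc u s).insert "digit" true = pvMkD l true lc u s := rfl
@[simp] lemma pvMkD_ins_upper (l d lc u s : Bool) :
    (pvMkD l d lc u s).insert "uppercase" true = pvMkD l d lc true s := rfl
@[simp] lemma pvMkD_ins_lower (l d lc u s : Bool) :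
    (pvMkD l d lc u s).insert "lowercase" true = pvMkD l d true u s := rfl
@[simp] lemma pvMkD_ins_special (l d lc u s : Bool) :
    (pvMkD l d lc u s).insert "special_char" true = pvMkD l d lc u true := rfl

/-- One step of A's fused scan ORs the character's four tests into the flags
    (stated in the zeta-expanded shape the foldl goal takes). -/
lemma pvStep_eq (l d lc u s : Bool) (c : Char) :
    (if PySem.Chars.isIn [c] "!@#$%^&*()-+".toList = true then
       (if PySem.Chars.islower c = true then
          (if PySem.Chars.isupper c = true then
             (if PySem.Chars.isdigit c = true then (pvMkD l d lc u s).insert "digit" true else pvMkD l d lc u s).insert "uppercase" true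
           else if PySem.Chars.isdigit c = true then (pvMkD l d lc u s).insert "digit" true else pvMkD l d lc u s).insert "lowercase" true
        else
          if PySem.Chars.isupper c = true then
            (if PySem.Chars.isdigit c = true then (pvMkD l d lc u s).insert "digit" true else pvMkD l d lc u s).insert "uppercase" true
          else if PySem.Chars.isdigit c = true then (pvMkD l d lc u s).insert "digit" true else pvMkD l d lc u s).insert "special_char" true
     else
       if PySem.Chars.islower c = true then
         (if PySem.Chars.isupper c = true then
            (if PySem.Chars.isdigit c = true then (pvMkD l d lc u s).insert "digit" true else pvMkD l d lc u s).insert "uppercase" true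
          else if PySem.Chars.isdigit c = true then (pvMkD l d lc u s).insert "digit" true else pvMkD l d lc u s).insert "lowercase" true
       else
         if PySem.Chars.isupper c = true then
           (if PySem.Chars.isdigit c = true then (pvMkD l d lc u s).insert "digit" true else pvMkD l d lc u s).insert "uppercase" true
         else if PySem.Chars.isdigit c = true then (pvMkD l d lc u s).insert "digit" true else pvMkD l d lc u s)
    = pvMkD l (d || PySem.Chars.isdigit c) (lc || PySem.Chars.islower c)
        (u || PySem.Chars.isupper c) (s || PySem.Chars.isIn [c] "!@#$%^&*()-+".toList) := by
  cases PySem.Chars.isdigit c <;> cases PySem.Chars.isupper c <;>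
    cases PySem.Chars.islower c <;> cases PySem.Chars.isIn [c] "!@#$%^&*()-+".toList <;> simp

/-- A's fused inner scan computes the same flags as B's five independent any-passes. -/
lemma pvInner_eq (cs : List Char) (l d lc u s : Bool) :
    cs.foldl (fun st char =>
        let st := if PySem.Chars.isdigit char then st.insert "digit" true else st
        let st := if PySem.Chars.isupper char then st.insert "uppercase" true else st
        let st := if PySem.Chars.islower char then st.insert "lowercase" true else st
        let st := if PySem.Chars.isIn [char] "!@#$%^&*()-+".toList then st.insert "special_char" true else st
        st) (pvMkD l d lc u s)
    = pvMkD l (d || cs.any PySem.Chars.isdigit) (lc || cs.any PySem.Chars.islower)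
        (u || cs.any PySem.Chars.isupper)
        (s || cs.any (fun c => PySem.Chars.isIn [c] "!@#$%^&*()-+".toList)) := by
  induction cs generalizing d lc u s with
  | nil => simp
  | cons c cs ih =>
      simp only [List.foldl_cons, List.any_cons]
      rw [pvStep_eq, ih]
      simp only [Bool.or_assoc]

-- ===== VERDICT (by name: the statement is the Claim_ definition above) =====
theorem multi_password_strength_counter_spec : Claim_equal_multi_password_strength_counter := by
  intro passwords _
  unfold Spec_multi_password_strength_counter
  unfold multi_password_strength_counter multi_password_strength_counter_alt
  rw [PySem.List.foldl_append_singleton_eq_map]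
  refine List.map_congr_left (fun p _ => ?_)
  by_cases h : 8 ≤ PySem.Str.len p
  · simp only [h, if_pos]
    rw [show (PySem.Dict.mk [("length", false), ("digit", false), ("lowercase", false),
          ("uppercase", false), ("special_char", false)]).insert "length" true
        = pvMkD true false false false false from rfl, pvInner_eq]
    simp [pvMkD]
  · simp only [h, if_neg, not_false_iff]
    rw [show (PySem.Dict.mk [("length", false), ("digit", false), ("lowercase", false),
          ("uppercase", false), ("special_char", false)]) = pvMkD false false false false false from rfl,
        pvInner_eq]
    simp [pvMkD]
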